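-- pv_equiv track=rewrite | github.com/NVIDIA/DCGM | testing/python3/tests/test_dcgmi.py | _lines_with_errors
-- ===== SOURCE A (Python) =====
-- def _lines_with_errors(lines):
--     errorLines = []
--
--     errorStrings = [
--         'error',
--         'invalid',
--         'incorrect',
--         'unexpected'
--     ]
--     exceptionStrings = [
--         'nvlink error',
--         'flit error',
--         'data error',
--         'replay error',
--         'recovery error',
--         'ecc error',
--         'xid error',
--         '| error detail',
--         'malformed packet error',
--         'buffer overrun error',
--         'rx error',
--         'rx remote error',
--         'rx general error',
--         'link integrity error',
--         'rx symbol error',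
--         'effective error'
--     ]
--
--     for line in lines:
--         lineLower = line.lower()
--
--         for errorString in errorStrings:
--             if not errorString in lineLower:
--                 continue
--
--             wasExcepted = False
--             for exceptionString in exceptionStrings:
--                 if exceptionString in lineLower:
--                     wasExcepted = True
--                     break
--             if wasExcepted:
--                 continue
--
--             errorLines.append(line)
--
--     return errorLines
-- ===== SOURCE B (Python) =====
-- def _lines_with_errors(lines):
--     errorStrings = ['error', 'invalid', 'incorrect', 'unexpected']
--     exceptionStrings = [
--         'nvlink error', 'flit error', 'data error', 'replay error',
--         'recovery error', 'ecc error', 'xid error', '| error detail',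
--         'malformed packet error', 'buffer overrun error', 'rx error',
--         'rx remote error', 'rx general error', 'link integrity error',
--         'rx symbol error', 'effective error'
--     ]
--
--     def is_error_line(line):
--         low = line.lower()
--         return (any(e in low for e in errorStrings)
--                 and not any(x in low for x in exceptionStrings))
--
--     return [line for line in lines if is_error_line(line)]
-- ===== Notes on version B (the rewrite author's own statement) =====
-- stated objective: simpler
-- what changed: Replaces the nested append-per-matching-keyword loops with a single predicate-based filter (any error word present and no exception phrase present), appending each offending line once.
-- intended difference: On lines that contain two or more of the error words (and no exception phrase) A appends the same line once per matching word, so the line appears multiple times in the output; B returns each offending line exactly once, which is the intended 'lines with errors' result. — e.g. on _lines_with_errors(["invalid error"]): A returns ["invalid error", "invalid error"], B returns ["invalid error"]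
import Mathlib
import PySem

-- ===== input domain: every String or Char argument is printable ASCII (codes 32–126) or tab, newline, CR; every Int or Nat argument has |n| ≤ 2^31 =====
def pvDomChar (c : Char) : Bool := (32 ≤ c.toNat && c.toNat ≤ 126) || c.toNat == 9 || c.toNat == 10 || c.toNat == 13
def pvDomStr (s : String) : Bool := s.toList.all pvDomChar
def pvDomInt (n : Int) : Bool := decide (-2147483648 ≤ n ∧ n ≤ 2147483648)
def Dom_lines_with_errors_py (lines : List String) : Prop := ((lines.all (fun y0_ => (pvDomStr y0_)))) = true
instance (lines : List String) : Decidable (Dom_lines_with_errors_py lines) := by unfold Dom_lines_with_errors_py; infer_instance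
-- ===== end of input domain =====

-- B filters lines with a single error/exception predicate, appending each offending line
-- once (objective: simpler); A appends a line once per matching error word — declared as an
-- intended difference on lines matching two or more error words (D_ below).


-- ===== PORT A =====
def pvErrorStrings : List String := ["error", "invalid", "incorrect", "unexpected"]

def pvExceptionStrings : List String :=
  ["nvlink error", "flit error", "data error", "replay error",
   "recovery error", "ecc error", "xid error", "| error detail",
   "malformed packet error", "buffer overrun error", "rx error",
   "rx remote error", "rx general error", "link integrity error",
   "rx symbol error", "effective error"]

-- literal transliteration of A: outer loop over lines, inner loop over error words,
-- innermost flag loop over exception phrases (break ported as the ||-fold it computes)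
def lines_with_errors_py (lines : List String) : List String :=
  lines.foldl (fun errorLines line =>
    let lineLower := PySem.Str.lower line
    pvErrorStrings.foldl (fun acc errorString =>
      if !(PySem.Str.isIn errorString lineLower) then acc
      else
        let wasExcepted :=
          pvExceptionStrings.foldl (fun w exceptionString =>
            w || PySem.Str.isIn exceptionString lineLower) false
        if wasExcepted then acc else acc ++ [line]) errorLines) []

-- ===== PORT B =====
-- transliteration of B: one predicate, one filter
def pvIsErrorLine (line : String) : Bool :=
  let low := PySem.Str.lower line
  (pvErrorStrings.any (fun e => PySem.Str.isIn e low)) &&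
  !(pvExceptionStrings.any (fun x => PySem.Str.isIn x low))

def lines_with_errors_py_alt (lines : List String) : List String :=
  lines.filter pvIsErrorLine

-- ===== PRECONDITION & SPEC =====
-- On lines containing two or more of the error words (and no exception phrase) A appends
-- the same line once per matching word; B returns each offending line exactly once, the
-- intended 'lines with errors' result.
def D_lines_with_errors_py (lines : List String) : Prop :=
  ∃ line ∈ lines,
    (pvExceptionStrings.any (fun x => PySem.Str.isIn x (PySem.Str.lower line))) = false ∧
    2 ≤ pvErrorStrings.countP (fun e => PySem.Str.isIn e (PySem.Str.lower line))
instance (lines : List String) : Decidable (D_lines_with_errors_py lines) := by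
  unfold D_lines_with_errors_py; infer_instance

def Spec_lines_with_errors_py (lines : List String) (out : List String) : Prop :=
  ¬ D_lines_with_errors_py lines → out = lines_with_errors_py_alt lines
instance (lines : List String) (out : List String) : Decidable (Spec_lines_with_errors_py lines out) := by
  unfold Spec_lines_with_errors_py; infer_instance

def pvDiffWitness_lines_with_errors_py : List String := ["invalid error"]
def pvDiffWitnessOut_lines_with_errors_py : (List String) × (List String) :=
  (["invalid error", "invalid error"], ["invalid error"])

-- ===== CLAIM =====
def Claim_unchanged_lines_with_errors_py : Prop :=
  ∀ (lines : List String), Dom_lines_with_errors_py lines →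
    Spec_lines_with_errors_py lines (lines_with_errors_py lines)
def Claim_changed_lines_with_errors_py : Prop :=
  Dom_lines_with_errors_py pvDiffWitness_lines_with_errors_py ∧
  D_lines_with_errors_py pvDiffWitness_lines_with_errors_py ∧
  lines_with_errors_py pvDiffWitness_lines_with_errors_py = pvDiffWitnessOut_lines_with_errors_py.1 ∧
  lines_with_errors_py_alt pvDiffWitness_lines_with_errors_py = pvDiffWitnessOut_lines_with_errors_py.2 ∧
  pvDiffWitnessOut_lines_with_errors_py.1 ≠ pvDiffWitnessOut_lines_with_errors_py.2
def Claim_exact_lines_with_errors_py : Prop :=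
  ∀ (lines : List String), Dom_lines_with_errors_py lines →
    D_lines_with_errors_py lines →
    lines_with_errors_py lines ≠ lines_with_errors_py_alt lines

-- ===== LEMMAS AND PROOFS =====

-- abbreviations for the proofs
def pvExcepted (line : String) : Bool :=
  pvExceptionStrings.any (fun x => PySem.Str.isIn x (PySem.Str.lower line))
def pvCount (line : String) : Nat :=
  pvErrorStrings.countP (fun e => PySem.Str.isIn e (PySem.Str.lower line))
-- A's per-line multiplicity
def pvWeight (line : String) : Nat := if pvExcepted line then 0 else pvCount line

-- the ||-fold (A's break-flag loop) computes List.any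
lemma foldl_or_eq_any {α : Type} (l : List α) (p : α → Bool) (b : Bool) :
    l.foldl (fun w s => w || p s) b = (b || l.any p) := by
  induction l generalizing b with
  | nil => simp
  | cons x xs ih => simp [List.foldl, ih, Bool.or_assoc]

-- A's per-line step appends the line pvWeight-many times
lemma stepA_eq (acc : List String) (line : String) :
    (let lineLower := PySem.Str.lower line
     pvErrorStrings.foldl (fun a errorString =>
      if !(PySem.Str.isIn errorString lineLower) then a
      else
        let wasExcepted :=
          pvExceptionStrings.foldl (fun w exceptionString =>
            w || PySem.Str.isIn exceptionString lineLower) false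
        if wasExcepted then a else a ++ [line]) acc)
    = acc ++ List.replicate (pvWeight line) line := by
  simp only [foldl_or_eq_any, Bool.false_or, pvWeight, pvExcepted, pvCount]
  cases hx : pvExceptionStrings.any (fun s => PySem.Str.isIn s (PySem.Str.lower line)) with
  | true =>
    simp only [if_true]
    induction pvErrorStrings generalizing acc with
    | nil => simp
    | cons e es ih => simp only [List.foldl]; split <;> simp
  | false =>
    simp only [pvErrorStrings, List.foldl, List.countP, List.countP.go]
    generalize PySem.Str.isIn "error" (PySem.Str.lower line) = b1
    generalize PySem.Str.isIn "invalid" (PySem.Str.lower line) = b2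
    generalize PySem.Str.isIn "incorrect" (PySem.Str.lower line) = b3
    generalize PySem.Str.isIn "unexpected" (PySem.Str.lower line) = b4
    cases b1 <;> cases b2 <;> cases b3 <;> cases b4 <;>
      simp [List.replicate, List.append_assoc]

-- A's whole fold, characterised
lemma foldA_eq (lines : List String) (acc : List String) :
    lines.foldl (fun errorLines line =>
      let lineLower := PySem.Str.lower line
      pvErrorStrings.foldl (fun a errorString =>
        if !(PySem.Str.isIn errorString lineLower) then a
        else
          let wasExcepted :=
            pvExceptionStrings.foldl (fun w exceptionString =>
              w || PySem.Str.isIn exceptionString lineLower) false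
          if wasExcepted then a else a ++ [line]) errorLines) acc
    = acc ++ lines.flatMap (fun line => List.replicate (pvWeight line) line) := by
  simp only [stepA_eq]
  exact PySem.List.foldl_append_eq_flatMap (fun line => List.replicate (pvWeight line) line) lines acc

-- the predicate in terms of weight: B keeps a line iff A appends it at least once
lemma any_eq_decide_countP {α : Type} (l : List α) (p : α → Bool) :
    l.any p = decide (1 ≤ l.countP p) := by
  rw [Bool.eq_iff_iff]
  simp [List.any_eq_true, Nat.succ_le_iff, List.countP_pos_iff]

lemma isErrorLine_iff (line : String) : pvIsErrorLine line = decide (1 ≤ pvWeight line) := by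
  simp only [pvIsErrorLine, pvWeight, pvExcepted, pvCount]
  cases hx : pvExceptionStrings.any (fun x => PySem.Str.isIn x (PySem.Str.lower line)) with
  | true => simp
  | false =>
    simp only [Bool.not_false, Bool.and_true, Bool.false_eq_true, if_false]
    exact any_eq_decide_countP pvErrorStrings _

-- outside D_, every line has weight ≤ 1, so replicate (weight) = filter's contribution
lemma flatMap_eq_filter_of_small (lines : List String)
    (h : ∀ line ∈ lines, pvWeight line ≤ 1) :
    lines.flatMap (fun line => List.replicate (pvWeight line) line)
      = lines.filter pvIsErrorLine := by
  induction lines with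
  | nil => rfl
  | cons x xs ih =>
    have hx := h x (List.mem_cons_self)
    have hxs := ih (fun l hl => h l (List.mem_cons_of_mem _ hl))
    simp only [List.flatMap_cons, List.filter_cons, isErrorLine_iff, hxs]
    interval_cases hw : pvWeight x <;> simp [List.replicate]

-- ¬ D_ means every line has weight ≤ 1
lemma not_D_weights (lines : List String) (h : ¬ D_lines_with_errors_py lines) :
    ∀ line ∈ lines, pvWeight line ≤ 1 := by
  intro line hl
  cases hx : pvExcepted line with
  | true => simp [pvWeight, hx]
  | false =>
    by_contra hc
    simp only [pvWeight, hx, Bool.false_eq_true, if_false] at hc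
    have h2 : 2 ≤ pvCount line := by omega
    exact h ⟨line, hl, hx, h2⟩

-- length of A's output
lemma lenA (lines : List String) :
    (lines.flatMap (fun line => List.replicate (pvWeight line) line)).length
      = (lines.map pvWeight).sum := by
  induction lines with
  | nil => rfl
  | cons x xs ih => simp [List.flatMap_cons, ih]

-- B never keeps more copies than A appends
lemma weight_ge_indicator (line : String) :
    (if pvIsErrorLine line then 1 else 0) ≤ pvWeight line := by
  rw [isErrorLine_iff]
  by_cases h : 1 ≤ pvWeight line
  · simp [h]
  · simp [h]

lemma lenB_le (lines : List String) :
    (lines.filter pvIsErrorLine).length ≤ (lines.map pvWeight).sum := by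
  induction lines with
  | nil => simp
  | cons x xs ih =>
    have hge := weight_ge_indicator x
    cases hb : pvIsErrorLine x with
    | true =>
      simp only [hb, if_true] at hge
      simp only [List.filter_cons, hb, if_true, List.length_cons, List.map_cons, List.sum_cons]
      omega
    | false =>
      simp only [List.filter_cons, hb, Bool.false_eq_true, if_false, List.map_cons, List.sum_cons]
      omega

-- …and strictly fewer copies on a D_-line
lemma lenB_lt (lines : List String) (h : D_lines_with_errors_py lines) :
    (lines.filter pvIsErrorLine).length < (lines.map pvWeight).sum := by
  induction lines with
  | nil => exact absurd h (by simp [D_lines_with_errors_py])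
  | cons x xs ih =>
    obtain ⟨l, hl, hx, hc⟩ := h
    simp only [List.filter_cons, List.map_cons, List.sum_cons]
    rcases List.mem_cons.mp hl with rfl | hmem
    · have hw : 2 ≤ pvWeight l := by
        simp only [pvWeight, pvExcepted, hx, Bool.false_eq_true, if_false]; exact hc
      have hle := lenB_le xs
      split
      · simp only [List.length_cons]; omega
      · omega
    · have hlt := ih ⟨l, hmem, hx, hc⟩
      have hge := weight_ge_indicator x
      split
      · simp only [List.length_cons]
        simp_all
        omega
      · simp_all
        omega
-- ===== VERDICT =====
theorem lines_with_errors_py_spec : Claim_unchanged_lines_with_errors_py := by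
  intro lines _ hnd
  unfold lines_with_errors_py lines_with_errors_py_alt
  rw [foldA_eq, List.nil_append]
  exact flatMap_eq_filter_of_small lines (not_D_weights lines hnd)

theorem lines_with_errors_py_changed : Claim_changed_lines_with_errors_py := by
  unfold Claim_changed_lines_with_errors_py; decide

theorem lines_with_errors_py_tight : Claim_exact_lines_with_errors_py := by
  intro lines _ hd heq
  have h1 : (lines_with_errors_py lines).length = (lines.map pvWeight).sum := by
    unfold lines_with_errors_py; rw [foldA_eq, List.nil_append]; exact lenA lines
  have h2 : (lines_with_errors_py_alt lines).length < (lines.map pvWeight).sum := by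
    unfold lines_with_errors_py_alt; exact lenB_lt lines hd
  rw [heq] at h1
  omega
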